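-- pv_equiv track=rewrite | github.com/drtamarojgreen/quanta_tissu | tests/model/bdd/run_model_bdd_suite.py | _parse_scenario_steps
-- ===== SOURCE A (Python) =====
-- def _parse_scenario_steps(scenario_lines):
--     steps = []
--     i = 0
--     while i < len(scenario_lines):
--         line = scenario_lines[i].strip()
--         if not line or line.startswith('#'):
--             i += 1
--             continue
--
--         if line.startswith(('Given', 'When', 'Then', 'And', 'But')):
--             step_line = line
--             table_lines = []
--             j = i + 1
--             while j < len(scenario_lines) and scenario_lines[j].strip().startswith('|'):
--                 table_lines.append(scenario_lines[j].strip())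
--                 j += 1
--
--             steps.append((step_line, table_lines if table_lines else None))
--             i = j
--         else:
--             i += 1
--     return steps
-- ===== SOURCE B (Python) =====
-- def _parse_scenario_steps(scenario_lines):
--     steps = []  # mutable [step_line, table_list_or_None] entries
--     last_attachable = False
--     for raw in scenario_lines:
--         line = raw.strip()
--         if last_attachable and line.startswith('|'):
--             if steps[-1][1] is None:
--                 steps[-1][1] = []
--             steps[-1][1].append(line)
--         elif line.startswith(('Given', 'When', 'Then', 'And', 'But')):
--             steps.append([line, None])
--             last_attachable = True
--         else:
--             last_attachable = False
--     return [(s, t) for s, t in steps]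
-- ===== Notes on version B (the rewrite author's own statement) =====
-- stated objective: simpler
-- what changed: A's index-based while loop with a nested look-ahead while that collects table lines is replaced by a single flat pass over the lines carrying a 'last line was step/table' boolean flag, attaching '|' lines to the most recently appended step. One strip per line and no nested re-scan gives a constant-factor speedup.
import Mathlib
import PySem

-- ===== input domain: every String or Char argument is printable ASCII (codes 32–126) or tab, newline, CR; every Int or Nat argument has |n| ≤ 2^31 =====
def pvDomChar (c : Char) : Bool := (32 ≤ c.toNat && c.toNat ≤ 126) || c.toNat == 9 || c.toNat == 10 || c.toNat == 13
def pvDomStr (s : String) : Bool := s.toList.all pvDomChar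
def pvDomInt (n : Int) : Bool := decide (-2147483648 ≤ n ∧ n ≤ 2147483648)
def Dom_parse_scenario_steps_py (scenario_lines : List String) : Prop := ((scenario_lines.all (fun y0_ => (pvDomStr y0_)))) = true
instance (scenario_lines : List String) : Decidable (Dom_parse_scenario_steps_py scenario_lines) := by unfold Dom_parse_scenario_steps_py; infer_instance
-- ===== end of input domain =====

-- B replaces A's index-based while loop with look-ahead inner loop by a single flat pass
-- carrying a boolean "last line was step/table" flag (objective: simpler/alternative, same cost).

-- ===== PORT A =====
-- line.startswith(('Given', 'When', 'Then', 'And', 'But'))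
def pvIsStepKwA (line : String) : Bool :=
  PySem.Str.startswith line "Given" || PySem.Str.startswith line "When" ||
  PySem.Str.startswith line "Then" || PySem.Str.startswith line "And" ||
  PySem.Str.startswith line "But"

-- inner while loop: collect consecutive lines whose strip starts with '|' (stripped), return
-- the collected table lines and the remaining suffix (Python's final j as a list position)
def pvCollectA : List String → List String × List String
  | [] => ([], [])
  | y :: ys =>
    let t := PySem.Str.strip y
    if PySem.Str.startswith t "|" then
      let r := pvCollectA ys
      (t :: r.1, r.2)
    else ([], y :: ys)

theorem pvCollectA_len : ∀ l : List String, (pvCollectA l).2.length ≤ l.length := by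
  intro l
  induction l with
  | nil => simp [pvCollectA]
  | cons y ys ih =>
    simp only [pvCollectA]
    split
    · simpa using Nat.le_succ_of_le ih
    · simp

def parse_scenario_steps_py (scenario_lines : List String) : List (String × Option (List String)) :=
  match scenario_lines with
  | [] => []
  | x :: rest =>
    let line := PySem.Str.strip x
    if line = "" ∨ PySem.Str.startswith line "#" = true then
      parse_scenario_steps_py rest
    else if pvIsStepKwA line then
      let r := pvCollectA rest
      (line, if r.1 = [] then none else some r.1) :: parse_scenario_steps_py r.2
    else parse_scenario_steps_py rest
termination_by scenario_lines.length
decreasing_by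
  · simp
  · have := pvCollectA_len rest; simp; omega
  · simp

-- ===== PORT B =====
def pvIsStepKwB (line : String) : Bool :=
  PySem.Str.startswith line "Given" || PySem.Str.startswith line "When" ||
  PySem.Str.startswith line "Then" || PySem.Str.startswith line "And" ||
  PySem.Str.startswith line "But"

-- one loop iteration of B: state = (steps so far, head = most recent step; last_attachable flag)
def pvStepB (st : List (String × Option (List String)) × Bool) (raw : String) :
    List (String × Option (List String)) × Bool :=
  let line := PySem.Str.strip raw
  if st.2 = true ∧ PySem.Str.startswith line "|" = true then
    (match st.1 with
     | (s, t) :: prev => (s, some (t.getD [] ++ [line])) :: prev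
     | [] => st.1,   -- unreachable: the flag is only set after a step was appended
     true)
  else if pvIsStepKwB line then
    ((line, none) :: st.1, true)
  else
    (st.1, false)

def parse_scenario_steps_py_alt (scenario_lines : List String) : List (String × Option (List String)) :=
  ((scenario_lines.foldl pvStepB ([], false)).1).reverse

-- ===== PRECONDITION & SPEC =====
def Spec_parse_scenario_steps_py (scenario_lines : List String) (out : List (String × Option (List String))) : Prop := out = parse_scenario_steps_py_alt scenario_lines
instance (scenario_lines : List String) (out : List (String × Option (List String))) : Decidable (Spec_parse_scenario_steps_py scenario_lines out) := by unfold Spec_parse_scenario_steps_py; infer_instance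

-- ===== CLAIM (what is proved, stated in full; the proofs are below) =====
def Claim_equal_parse_scenario_steps_py : Prop := ∀ (scenario_lines : List String), Dom_parse_scenario_steps_py scenario_lines → Spec_parse_scenario_steps_py scenario_lines (parse_scenario_steps_py scenario_lines)

-- ===== LEMMAS AND PROOFS =====

-- "table_lines if table_lines else None" / B's lazily created list, as one abbreviation
def pvOpt (u : List String) : Option (List String) := if u = [] then none else some u

theorem pvKw_not_blank (line : String) (h : pvIsStepKwA line = true) :
    ¬ (line = "" ∨ PySem.Str.startswith line "#" = true) := by
  rintro (rfl | hh)
  · exact absurd h (by decide)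
  · have hpre : ('#' :: ([] : List Char)) <+: line.toList := by
      have := (PySem.Chars.startswith_iff line.toList "#".toList).mp (by simpa using hh)
      simpa using this
    obtain ⟨r, hr⟩ := hpre
    simp only [pvIsStepKwA, Bool.or_eq_true] at h
    rcases h with ((((h|h)|h)|h)|h) <;>
    · have hp := (PySem.Chars.startswith_iff line.toList _).mp (by simpa using h)
      obtain ⟨r2, hr2⟩ := hp
      rw [← hr] at hr2
      simp at hr2

theorem pvKwAB : pvIsStepKwB = pvIsStepKwA := rfl

theorem pv_parse_skip (x : String) (l : List String)
    (h : pvIsStepKwA (PySem.Str.strip x) = false) :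
    parse_scenario_steps_py (x :: l) = parse_scenario_steps_py l := by
  rw [parse_scenario_steps_py]
  simp only [h]
  split <;> rfl

theorem pv_parse_step (x : String) (l : List String)
    (h : pvIsStepKwA (PySem.Str.strip x) = true) :
    parse_scenario_steps_py (x :: l)
      = (PySem.Str.strip x, pvOpt (pvCollectA l).1) :: parse_scenario_steps_py (pvCollectA l).2 := by
  rw [parse_scenario_steps_py]
  simp only [h, if_true]
  rw [if_neg (pvKw_not_blank _ h)]
  rfl

theorem pvOpt_getD (t : List String) : (pvOpt t).getD [] = t := by
  unfold pvOpt; split <;> simp_all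

-- the loop invariant: running B's fold from a "not attachable" state appends A's parse of the
-- remaining lines (reversed); from an "attachable" state with a partially built last step it
-- first finishes that step's table exactly as A's inner while loop does.
theorem pvRun_spec : ∀ (l : List String) (acc : List (String × Option (List String))),
    ((l.foldl pvStepB (acc, false)).1 = (parse_scenario_steps_py l).reverse ++ acc)
    ∧ (∀ (s : String) (t : List String),
        (l.foldl pvStepB ((s, pvOpt t) :: acc, true)).1
          = (parse_scenario_steps_py (pvCollectA l).2).reverse
              ++ ((s, pvOpt (t ++ (pvCollectA l).1)) :: acc)) := by
  intro l
  induction l with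
  | nil =>
    intro acc
    refine ⟨by simp [parse_scenario_steps_py], ?_⟩
    intro s t
    simp [parse_scenario_steps_py, pvCollectA]
  | cons x l ih =>
    intro acc
    constructor
    · -- part 1: flag is false at x
      simp only [List.foldl_cons]
      cases hkw : pvIsStepKwA (PySem.Str.strip x) with
      | true =>
        have hstep : pvStepB (acc, false) x = ((PySem.Str.strip x, none) :: acc, true) := by
          simp [pvStepB, pvKwAB, hkw]
        rw [hstep]
        have h2 := (ih acc).2 (PySem.Str.strip x) []
        simp only [List.nil_append] at h2
        rw [show (none : Option (List String)) = pvOpt [] from rfl, h2,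
            pv_parse_step x l hkw]
        simp
      | false =>
        have hstep : pvStepB (acc, false) x = (acc, false) := by
          simp [pvStepB, pvKwAB, hkw]
        rw [hstep, (ih acc).1, pv_parse_skip x l hkw]
    · -- part 2: flag is true at x, last step (s, pvOpt t) on top
      intro s t
      simp only [List.foldl_cons]
      cases hbar : PySem.Chars.startswith (PySem.Chars.strip x.toList) ['|'] with
      | true =>
        have hstep : pvStepB ((s, pvOpt t) :: acc, true) x
            = ((s, some (t ++ [PySem.Str.strip x])) :: acc, true) := by
          simp [pvStepB, hbar, pvOpt_getD]
        rw [hstep,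
            show ((s, some (t ++ [PySem.Str.strip x])) : String × Option (List String))
              = (s, pvOpt (t ++ [PySem.Str.strip x])) by simp [pvOpt],
            (ih acc).2 s (t ++ [PySem.Str.strip x])]
        have hc : pvCollectA (x :: l)
            = (PySem.Str.strip x :: (pvCollectA l).1, (pvCollectA l).2) := by
          simp [pvCollectA, hbar]
        rw [hc]
        simp
      | false =>
        have hc : pvCollectA (x :: l) = ([], x :: l) := by
          simp [pvCollectA, hbar]
        rw [hc]
        cases hkw : pvIsStepKwA (PySem.Str.strip x) with
        | true =>
          have hstep : pvStepB ((s, pvOpt t) :: acc, true) x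
              = ((PySem.Str.strip x, none) :: (s, pvOpt t) :: acc, true) := by
            simp [pvStepB, pvKwAB, hkw, hbar]
          rw [hstep]
          have h2 := (ih ((s, pvOpt t) :: acc)).2 (PySem.Str.strip x) []
          simp only [List.nil_append] at h2
          rw [show (none : Option (List String)) = pvOpt [] from rfl, h2,
              pv_parse_step x l hkw]
          simp
        | false =>
          have hstep : pvStepB ((s, pvOpt t) :: acc, true) x = ((s, pvOpt t) :: acc, false) := by
            simp [pvStepB, pvKwAB, hkw, hbar]
          rw [hstep, (ih ((s, pvOpt t) :: acc)).1, pv_parse_skip x l hkw]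
          simp

-- ===== VERDICT (by name: the statement is the Claim_ definition above) =====
theorem parse_scenario_steps_py_spec : Claim_equal_parse_scenario_steps_py := by
  intro xs _
  unfold Spec_parse_scenario_steps_py parse_scenario_steps_py_alt
  have h := (pvRun_spec xs []).1
  simp [h]
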